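-- pv_equiv track=rewrite | github.com/AMD-AIG-AIMA/Instella | scripts/generate_gsm8k_programs.py | clean_runnable_program_simple
-- ===== SOURCE A (Python) =====
-- def clean_runnable_program_simple(program):
--     lines = program.split("\n")
--     outs_lines = []
--     start = False
--     for line in lines:
--         if line.startswith("def") or line.startswith("'''"):
--             start = True
--         if not start:
--             continue
--         if "program ends" in line.lower():
--             break
--         if "```" in line:
--             break
--         outs_lines.append(line)
--     return "\n".join(outs_lines)
-- ===== SOURCE B (Python) =====
-- def clean_runnable_program_simple(program):
--     def is_start(ln):
--         return ln.startswith("def") or ln.startswith("'''")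
--
--     def is_term(ln):
--         return "program ends" in ln.lower() or "```" in ln
--
--     lines = program.split("\n")
--     i = next((k for k, ln in enumerate(lines) if is_start(ln)), None)
--     if i is None:
--         return ""
--     tail = lines[i:]
--     j = next((k for k, ln in enumerate(tail) if is_term(ln)), len(tail))
--     return "\n".join(tail[:j])
-- ===== Notes on version B (the rewrite author's own statement) =====
-- stated objective: alternative
-- what changed: Replaced the flag-threaded accumulating loop with two explicit boundary searches (first start-line index, first terminator index in the tail) followed by a slice and join.
import Mathlib
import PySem

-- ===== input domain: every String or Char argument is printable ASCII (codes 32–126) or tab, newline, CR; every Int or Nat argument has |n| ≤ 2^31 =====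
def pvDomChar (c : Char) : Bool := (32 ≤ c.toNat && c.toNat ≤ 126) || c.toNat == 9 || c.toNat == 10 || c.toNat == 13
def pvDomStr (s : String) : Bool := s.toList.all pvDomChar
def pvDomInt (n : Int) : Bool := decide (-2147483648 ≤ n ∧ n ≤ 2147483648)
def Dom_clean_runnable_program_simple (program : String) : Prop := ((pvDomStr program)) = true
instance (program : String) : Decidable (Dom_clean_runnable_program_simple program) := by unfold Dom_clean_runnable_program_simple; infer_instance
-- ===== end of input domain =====

-- B replaces A's flag-threaded accumulating loop with two boundary searches and a slice (alternative decomposition, same cost).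

-- ===== PORT A =====
-- the for-loop of A: state = (accumulated output lines, start flag); break returns the accumulator
def pvLoopA : List String → Bool → List String → List String
  | [], _, outs => outs
  | l :: ls, start, outs =>
    let start := start || PySem.Str.startswith l "def" || PySem.Str.startswith l "'''"
    if !start then pvLoopA ls start outs
    else if PySem.Str.isIn "program ends" (PySem.Str.lower l) then outs
    else if PySem.Str.isIn "```" l then outs
    else pvLoopA ls start (outs ++ [l])

def clean_runnable_program_simple (program : String) : String :=
  let lines := ((PySem.Str.split? program "\n").getD [])  -- sep "\n" ≠ "" so split? is some; exact Python str.split("\n")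
  PySem.Str.join "\n" (pvLoopA lines false [])

-- ===== PORT B =====
def pvIsStart (ln : String) : Bool :=
  PySem.Str.startswith ln "def" || PySem.Str.startswith ln "'''"

def pvIsTerm (ln : String) : Bool :=
  PySem.Str.isIn "program ends" (PySem.Str.lower ln) || PySem.Str.isIn "```" ln

def clean_runnable_program_simple_alt (program : String) : String :=
  let lines := ((PySem.Str.split? program "\n").getD [])  -- sep "\n" ≠ "" so split? is some; exact Python str.split("\n")
  match lines.findIdx? pvIsStart with
  | none => ""
  | some i =>
    let tail := lines.drop i
    let j := (tail.findIdx? pvIsTerm).getD tail.length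
    PySem.Str.join "\n" (tail.take j)

-- ===== PRECONDITION & SPEC =====
def Spec_clean_runnable_program_simple (program : String) (out : String) : Prop := out = clean_runnable_program_simple_alt program
instance (program : String) (out : String) : Decidable (Spec_clean_runnable_program_simple program out) := by unfold Spec_clean_runnable_program_simple; infer_instance

-- ===== CLAIM (what is proved, stated in full; the proofs are below) =====
def Claim_equal_clean_runnable_program_simple : Prop := ∀ (program : String), Dom_clean_runnable_program_simple program → Spec_clean_runnable_program_simple program (clean_runnable_program_simple program)

-- ===== LEMMAS AND PROOFS =====

-- once the start flag is set, A's loop appends the longest terminator-free prefix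
-- the negated terminator test, written in the simp-normal (Chars-level) form
theorem pvNotTerm_eq :
    (fun l => !pvIsTerm l) =
      (fun l : String =>
        !PySem.Chars.isIn ['p', 'r', 'o', 'g', 'r', 'a', 'm', ' ', 'e', 'n', 'd', 's']
            (PySem.Chars.lower l.toList) &&
          !PySem.Chars.isIn ['`', '`', '`'] l.toList) := by
  funext l; simp [pvIsTerm]

theorem pvLoopA_true (ls : List String) (outs : List String) :
    pvLoopA ls true outs = outs ++ ls.takeWhile (fun l => !pvIsTerm l) := by
  induction ls generalizing outs with
  | nil => simp [pvLoopA]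
  | cons l ls ih =>
    simp only [pvLoopA, Bool.true_or, Bool.not_true, List.takeWhile_cons, pvIsTerm]
    simp only [Bool.not_or, Bool.and_eq_true, Bool.not_eq_eq_eq_not, Bool.not_true]
    split_ifs <;> simp_all [pvNotTerm_eq]

-- with the flag unset, A's loop searches for the first start line, then behaves as pvLoopA_true
theorem pvLoopA_false (ls : List String) (outs : List String) :
    pvLoopA ls false outs =
      match ls.findIdx? pvIsStart with
      | none => outs
      | some i => outs ++ ((ls.drop i).takeWhile (fun l => !pvIsTerm l)) := by
  induction ls generalizing outs with
  | nil => simp [pvLoopA]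
  | cons l ls ih =>
    by_cases hs : pvIsStart l = true
    · have hs' := hs
      simp only [pvIsStart] at hs'
      simp only [pvLoopA, Bool.false_or, hs', List.findIdx?_cons, hs, if_pos, List.drop_zero,
        List.takeWhile_cons, pvIsTerm]
      simp only [Bool.not_or, Bool.and_eq_true, Bool.not_eq_eq_eq_not, Bool.not_true]
      split_ifs <;> simp_all [pvLoopA_true, pvIsTerm]
    · have hs' : (PySem.Str.startswith l "def" || PySem.Str.startswith l "'''") = false := by
        simpa [pvIsStart] using hs
      simp only [pvLoopA, Bool.false_or, hs', Bool.not_false, if_pos, List.findIdx?_cons, hs]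
      rw [ih]
      cases h : ls.findIdx? pvIsStart <;> simp

-- B's boundary search + slice equals takeWhile
theorem take_findIdx_eq_takeWhile (p : String → Bool) (ls : List String) :
    ls.take ((ls.findIdx? p).getD ls.length) = ls.takeWhile (fun l => !p l) := by
  induction ls with
  | nil => simp
  | cons l ls ih =>
    by_cases h : p l = true
    · simp [List.findIdx?_cons, h, List.takeWhile]
    · simp only [List.findIdx?_cons, h, if_neg, Bool.false_eq_true, not_false_iff,
        List.takeWhile, ← ih]
      cases hf : ls.findIdx? p <;> simp

-- ===== VERDICT (by name: the statement is the Claim_ definition above) =====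
theorem clean_runnable_program_simple_spec : Claim_equal_clean_runnable_program_simple := by
  intro program _
  unfold Spec_clean_runnable_program_simple clean_runnable_program_simple clean_runnable_program_simple_alt
  cases h : List.findIdx? pvIsStart ((PySem.Str.split? program "\n").getD []) with
  | none => simp [pvLoopA_false, h, PySem.Str.join, PySem.Chars.join, List.intercalate]
  | some i =>
    simp only [pvLoopA_false, h, List.nil_append]
    rw [take_findIdx_eq_takeWhile]
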